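-- pv_equiv track=rewrite | github.com/Humandoodlebug/advent-of-code | 2023/src/bin/day_17.py | precalculate_heuristic
-- ===== SOURCE A (Python) =====
-- from queue import PriorityQueue
--
-- def precalculate_heuristic(in_map: list[list[int]]) -> list[list[int]]:
--     rows = len(in_map)
--     cols = len(in_map[0])
--     to_process: PriorityQueue[(int, int, int)] = PriorityQueue()
--     to_process.put((0, rows - 1, cols - 1))
--     results: list[list[int | None]] = [[None for _ in range(cols)] for _ in range(rows)]
--     to_find = len(results * len(results[0]))
--     while to_find > 0:
--         (cost, row, col) = to_process.get()
--         if results[row][col] is not None: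
--             continue
--         results[row][col] = cost
--         to_find -= 1
--         next_cost = cost + in_map[row][col]
--         next_states = [
--             (next_cost, row + r, col + c)
--             for (r, c) in [(0, 1), (1, 0), (0, -1), (-1, 0)]
--             if row + r >= 0 and row + r < rows and col + c >= 0 and col + c < cols
--         ]
--         for next_state in next_states:
--             if results[next_state[1]][next_state[2]] is None:
--                 to_process.put(next_state)
--     assert all(result is not None for row in results for result in row)
--     return results
-- ===== SOURCE B (Python) =====
-- def precalculate_heuristic(in_map: list[list[int]]) -> list[list[int]]:
--     rows = len(in_map)
--     cols = len(in_map[0])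
--     results: list[list[int | None]] = [[None] * cols for _ in range(rows)]
--     dist: list[list[int | None]] = [[None] * cols for _ in range(rows)]
--     if cols > 0:
--         dist[rows - 1][cols - 1] = 0
--     for _ in range(rows * cols):
--         best = None
--         for r in range(rows):
--             for c in range(cols):
--                 if results[r][c] is None and dist[r][c] is not None:
--                     if best is None or dist[r][c] < best[0]:
--                         best = (dist[r][c], r, c)
--         (cost, row, col) = best
--         results[row][col] = cost
--         next_cost = cost + in_map[row][col]
--         for (r, c) in ((row, col + 1), (row + 1, col), (row, col - 1), (row - 1, col)):
--             if 0 <= r < rows and 0 <= c < cols and results[r][c] is None: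
--                 if dist[r][c] is None or next_cost < dist[r][c]:
--                     dist[r][c] = next_cost
--     assert all(result is not None for row in results for result in row)
--     return results
-- ===== Notes on version B (the rewrite author's own statement) =====
-- stated objective: alternative
-- what changed: Replaces the PriorityQueue/heap Dijkstra with duplicate queue entries by array-based Dijkstra: a tentative-distance grid updated in place and a linear min-scan over the grid to pick each cell to settle; no priority queue and no duplicate entries.
import Mathlib
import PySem

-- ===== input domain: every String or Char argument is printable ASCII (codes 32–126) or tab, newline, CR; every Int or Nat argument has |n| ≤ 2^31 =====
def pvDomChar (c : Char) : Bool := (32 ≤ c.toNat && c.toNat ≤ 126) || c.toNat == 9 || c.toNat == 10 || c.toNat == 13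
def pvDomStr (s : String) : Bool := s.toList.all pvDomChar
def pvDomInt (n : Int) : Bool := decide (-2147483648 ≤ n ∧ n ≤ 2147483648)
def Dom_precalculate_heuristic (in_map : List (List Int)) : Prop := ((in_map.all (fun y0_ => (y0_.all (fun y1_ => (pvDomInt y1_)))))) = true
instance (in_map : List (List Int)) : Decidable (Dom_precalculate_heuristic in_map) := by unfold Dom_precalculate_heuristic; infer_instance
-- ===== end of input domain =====

-- B replaces A's heap-based Dijkstra (PriorityQueue with duplicate entries) by array-based
-- Dijkstra: a tentative-distance grid updated in place and a linear min-scan per settled cell;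
-- objective: alternative (no priority queue, no duplicate queue entries; identical results).


-- ===== PORT A =====
abbrev PvEnt : Type := Int × Int × Int

def pvEntLt (a b : PvEnt) : Bool :=
  a.1 < b.1 || (a.1 == b.1 && (a.2.1 < b.2.1 || (a.2.1 == b.2.1 && a.2.2 < b.2.2)))

def pvExtractMin : List PvEnt → Option (PvEnt × List PvEnt)
  | [] => none
  | e :: es =>
    match pvExtractMin es with
    | none => some (e, [])
    | some (m, rest) => if pvEntLt m e then some (m, e :: rest) else some (e, es)

abbrev PvGrid : Type := List (List (Option Int))

def pvGet (g : PvGrid) (r c : Int) : Option Int :=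
  (PySem.List.pyGet? ((PySem.List.pyGet? g r).getD []) c).join

def pvSet (g : PvGrid) (r c : Int) (v : Option Int) : PvGrid :=
  g.modify r.toNat (fun row => row.set c.toNat v)

theorem pvExtractMin_length : ∀ {q : List PvEnt} {e : PvEnt} {q' : List PvEnt},
    pvExtractMin q = some (e, q') → q'.length + 1 = q.length := by
  intro q
  induction q with
  | nil => intro e q' h; simp [pvExtractMin] at h
  | cons a as ih =>
    intro e q' h
    simp only [pvExtractMin] at h
    cases hE : pvExtractMin as with
    | none =>
      rw [hE] at h
      have hnil : as = [] := by
        cases as with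
        | nil => rfl
        | cons b bs =>
          exfalso
          simp only [pvExtractMin] at hE
          cases h2 : pvExtractMin bs with
          | none => rw [h2] at hE; simp at hE
          | some p =>
            obtain ⟨m2, r2⟩ := p
            rw [h2] at hE
            change (if pvEntLt m2 b = true then some (m2, b :: r2) else some (b, bs)) = none at hE
            split at hE <;> simp at hE
      subst hnil
      change some (a, ([] : List PvEnt)) = some (e, q') at h
      injection h with h3
      injection h3 with h4 h5
      subst h5
      simp
    | some p =>
      obtain ⟨m, rest⟩ := p
      rw [hE] at h
      change (if pvEntLt m a = true then some (m, a :: rest) else some (a, as)) = some (e, q') at h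
      have h2 := ih (e := m) (q' := rest) hE
      split at h
      · injection h with h3
        injection h3 with h4 h5
        subst h5
        simp only [List.length_cons]
        omega
      · injection h with h3
        injection h3 with h4 h5
        subst h5
        simp

def pvLoopA (in_map : List (List Int)) (rows cols : Int)
    (q : List PvEnt) (res : PvGrid) (to_find : Nat) : PvGrid :=
  if _h0 : to_find = 0 then res
  else
    match hE : pvExtractMin q with
    | none => res
    | some ((cost, row, col), q') =>
      if (pvGet res row col).isSome then
        pvLoopA in_map rows cols q' res to_find
      else
        let res' := pvSet res row col (some cost)
        let next_cost := cost + PySem.List.pyGetD (PySem.List.pyGetD in_map row []) col 0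
        let next_states := ([((0:Int),(1:Int)), (1,0), (0,-1), (-1,0)]).filterMap
          (fun rc => if 0 ≤ row + rc.1 ∧ row + rc.1 < rows ∧ 0 ≤ col + rc.2 ∧ col + rc.2 < cols
            then some (next_cost, row + rc.1, col + rc.2) else none)
        let q2 := next_states.foldl (fun acc s =>
          if (pvGet res' s.2.1 s.2.2).isNone then acc ++ [s] else acc) q'
        pvLoopA in_map rows cols q2 res' (to_find - 1)
termination_by (to_find, q.length)
decreasing_by
  · have := pvExtractMin_length hE
    exact Prod.Lex.right to_find (by omega)
  · exact Prod.Lex.left _ _ (by omega)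

def precalculate_heuristic (in_map : List (List Int)) : List (List Int) :=
  let rows := in_map.length
  let cols := (PySem.List.pyGetD in_map 0 []).length
  let results : PvGrid := List.replicate rows (List.replicate cols none)
  let q : List PvEnt := [((0 : Int), (rows : Int) - 1, (cols : Int) - 1)]
  let final := pvLoopA in_map (rows : Int) (cols : Int) q results (rows * cols)
  final.map (fun row => row.map (fun o => o.getD 0))

-- ===== PORT B =====
def pvScanBest (res dist : PvGrid) (rows cols : Int) : Option PvEnt :=
  (PySem.List.pyRange 0 rows 1).foldl (fun acc r =>
    (PySem.List.pyRange 0 cols 1).foldl (fun acc c =>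
      if (pvGet res r c).isNone then
        match pvGet dist r c with
        | none => acc
        | some d =>
          match acc with
          | none => some (d, r, c)
          | some b => if d < b.1 then some (d, r, c) else acc
      else acc) acc) none

def pvLoopB (in_map : List (List Int)) (rows cols : Int) :
    PvGrid → PvGrid → Nat → PvGrid
  | res, _, 0 => res
  | res, dist, n+1 =>
    match pvScanBest res dist rows cols with
    | none => res
    | some (cost, row, col) =>
      let res' := pvSet res row col (some cost)
      let next_cost := cost + PySem.List.pyGetD (PySem.List.pyGetD in_map row []) col 0
      let neighbours : List (Int × Int) := [(row, col + 1), (row + 1, col), (row, col - 1), (row - 1, col)]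
      let dist' := neighbours.foldl
        (fun (dG : PvGrid) (rc : Int × Int) =>
          if 0 ≤ rc.1 ∧ rc.1 < rows ∧ 0 ≤ rc.2 ∧ rc.2 < cols ∧ (pvGet res' rc.1 rc.2).isNone then
            match pvGet dG rc.1 rc.2 with
            | none => pvSet dG rc.1 rc.2 (some next_cost)
            | some d0 => if next_cost < d0 then pvSet dG rc.1 rc.2 (some next_cost) else dG
          else dG) dist
      pvLoopB in_map rows cols res' dist' n

def precalculate_heuristic_alt (in_map : List (List Int)) : List (List Int) :=
  let rows := in_map.length
  let cols := (PySem.List.pyGetD in_map 0 []).length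
  let results : PvGrid := List.replicate rows (List.replicate cols none)
  let dist0 : PvGrid := List.replicate rows (List.replicate cols none)
  let dist := if 0 < cols then pvSet dist0 ((rows : Int) - 1) ((cols : Int) - 1) (some 0) else dist0
  let final := pvLoopB in_map (rows : Int) (cols : Int) results dist (rows * cols)
  final.map (fun row => row.map (fun o => o.getD 0))

-- ===== PRECONDITION & SPEC =====
-- Pre_ excludes exactly the inputs where Python A raises: the empty grid (IndexError on
-- in_map[0]) and grids with some row shorter than row 0 (IndexError reading that row's weight
-- when one of its cells is settled — every cell gets settled). On every other input A returns.
def Pre_precalculate_heuristic (in_map : List (List Int)) : Prop :=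
  in_map ≠ [] ∧ ∀ row ∈ in_map, (in_map.headD []).length ≤ row.length
instance (in_map : List (List Int)) : Decidable (Pre_precalculate_heuristic in_map) := by
  unfold Pre_precalculate_heuristic; infer_instance

def pvWitness_precalculate_heuristic : List (List Int) := [[1, 2], [3, 4]]

def Spec_precalculate_heuristic (in_map : List (List Int)) (out : List (List Int)) : Prop :=
  out = precalculate_heuristic_alt in_map
instance (in_map : List (List Int)) (out : List (List Int)) : Decidable (Spec_precalculate_heuristic in_map out) := by
  unfold Spec_precalculate_heuristic; infer_instance

-- ===== CLAIM (what is proved, stated in full; the proofs are below) =====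
def Claim_equal_precalculate_heuristic : Prop := ∀ (in_map : List (List Int)), Dom_precalculate_heuristic in_map → Pre_precalculate_heuristic in_map → Spec_precalculate_heuristic in_map (precalculate_heuristic in_map)

-- ===== LEMMAS AND PROOFS =====

theorem pvEntLt_iff (a b : PvEnt) :
    pvEntLt a b = true ↔ (a.1 < b.1 ∨ (a.1 = b.1 ∧ (a.2.1 < b.2.1 ∨ (a.2.1 = b.2.1 ∧ a.2.2 < b.2.2)))) := by
  obtain ⟨a1, a2, a3⟩ := a; obtain ⟨b1, b2, b3⟩ := b
  simp [pvEntLt]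

theorem pvEntLt_irrefl (a : PvEnt) : pvEntLt a a = false := by
  obtain ⟨a1, a2, a3⟩ := a; simp [pvEntLt]

theorem pvEntLt_asymm {a b : PvEnt} (h : pvEntLt a b = true) : pvEntLt b a = false := by
  obtain ⟨a1, a2, a3⟩ := a; obtain ⟨b1, b2, b3⟩ := b
  simp [pvEntLt] at h ⊢; omega

theorem pvEntLt_notlt_trans {a b c : PvEnt}
    (h1 : pvEntLt b a = false) (h2 : pvEntLt c b = false) : pvEntLt c a = false := by
  obtain ⟨a1, a2, a3⟩ := a; obtain ⟨b1, b2, b3⟩ := b; obtain ⟨c1, c2, c3⟩ := c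
  simp [pvEntLt] at h1 h2 ⊢; omega

theorem pvEntLt_antisymm {a b : PvEnt}
    (h1 : pvEntLt a b = false) (h2 : pvEntLt b a = false) : a = b := by
  obtain ⟨a1, a2, a3⟩ := a; obtain ⟨b1, b2, b3⟩ := b
  simp [pvEntLt] at h1 h2 ⊢
  refine ⟨by omega, by omega, by omega⟩

theorem pvExtractMin_eq_none {q : List PvEnt} : pvExtractMin q = none ↔ q = [] := by
  cases q with
  | nil => simp [pvExtractMin]
  | cons a as =>
    simp only [pvExtractMin]
    cases hE : pvExtractMin as with
    | none =>
      change some (a, ([] : List PvEnt)) = none ↔ a :: as = []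
      simp
    | some p =>
      obtain ⟨m, rest⟩ := p
      change (if pvEntLt m a = true then some (m, a :: rest) else some (a, as)) = none ↔ a :: as = []
      split <;> simp

theorem pvExtractMin_perm {q : List PvEnt} {e : PvEnt} {q' : List PvEnt}
    (h : pvExtractMin q = some (e, q')) : q.Perm (e :: q') := by
  induction q generalizing e q' with
  | nil => simp [pvExtractMin] at h
  | cons a as ih =>
    simp only [pvExtractMin] at h
    cases hE : pvExtractMin as with
    | none =>
      rw [hE] at h
      have hnil : as = [] := pvExtractMin_eq_none.mp hE
      subst hnil
      change some (a, ([] : List PvEnt)) = some (e, q') at h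
      injection h with h3
      injection h3 with h4 h5
      rw [← h4, ← h5]
    | some p =>
      obtain ⟨m, rest⟩ := p
      rw [hE] at h
      change (if pvEntLt m a = true then some (m, a :: rest) else some (a, as)) = some (e, q') at h
      split at h
      · injection h with h3
        injection h3 with h4 h5
        have hperm : as.Perm (m :: rest) := ih hE
        rw [← h4, ← h5]
        exact (hperm.cons a).trans (List.Perm.swap m a rest)
      · injection h with h3
        injection h3 with h4 h5
        rw [← h4, ← h5]

theorem pvExtractMin_min {q : List PvEnt} {e : PvEnt} {q' : List PvEnt}
    (h : pvExtractMin q = some (e, q')) : ∀ x ∈ q, pvEntLt x e = false := by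
  induction q generalizing e q' with
  | nil => simp [pvExtractMin] at h
  | cons a as ih =>
    simp only [pvExtractMin] at h
    cases hE : pvExtractMin as with
    | none =>
      rw [hE] at h
      have hnil : as = [] := pvExtractMin_eq_none.mp hE
      subst hnil
      change some (a, ([] : List PvEnt)) = some (e, q') at h
      injection h with h3
      injection h3 with h4 h5
      intro x hx
      simp at hx
      rw [hx, ← h4]
      exact pvEntLt_irrefl a
    | some p =>
      obtain ⟨m, rest⟩ := p
      rw [hE] at h
      change (if pvEntLt m a = true then some (m, a :: rest) else some (a, as)) = some (e, q') at h
      split at h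
      case isTrue hLt =>
        injection h with h3
        injection h3 with h4 h5
        intro x hx
        rw [← h4]
        rcases List.mem_cons.mp hx with rfl | hx'
        · exact pvEntLt_asymm hLt
        · exact ih hE x hx'
      case isFalse hLt =>
        injection h with h3
        injection h3 with h4 h5
        intro x hx
        rw [← h4]
        have hLt' : pvEntLt m a = false := by simpa using hLt
        rcases List.mem_cons.mp hx with rfl | hx'
        · exact pvEntLt_irrefl x
        · exact pvEntLt_notlt_trans hLt' (ih hE x hx')

def pvShape (g : PvGrid) (R C : Nat) : Prop :=
  g.length = R ∧ ∀ i, i < R → (g[i]?.getD []).length = C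

def pvAt (g : PvGrid) (i j : Nat) : Option Int := ((g[i]?.getD [])[j]?).getD none

theorem pvGet_eq_pvAt (g : PvGrid) {r c : Int} (hr0 : 0 ≤ r) (hc0 : 0 ≤ c) :
    pvGet g r c = pvAt g r.toNat c.toNat := by
  unfold pvGet pvAt
  rw [PySem.List.pyGet?_of_nonneg (xs := g) hr0, PySem.List.pyGet?_of_nonneg (xs := g[r.toNat]?.getD []) hc0]
  cases h : (g[r.toNat]?.getD [])[c.toNat]? <;> simp

theorem pvShape_pvSet {g : PvGrid} {R C : Nat} (hs : pvShape g R C) (r c : Int) (v : Option Int) :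
    pvShape (pvSet g r c v) R C := by
  obtain ⟨h1, h2⟩ := hs
  constructor
  · simp [pvSet, h1]
  · intro i hi
    have hg : i < g.length := by omega
    have hC : (g[i]'hg).length = C := by
      have := h2 i hi
      simpa [List.getElem?_eq_getElem hg] using this
    simp only [pvSet, List.getElem?_modify, List.getElem?_eq_getElem hg]
    split <;> simp [hC]

theorem pvAt_pvSet_self {g : PvGrid} {R C : Nat} (hs : pvShape g R C) {r c : Int}
    (hr0 : 0 ≤ r) (hr : r < (R : Int)) (hc0 : 0 ≤ c) (hc : c < (C : Int)) (v : Option Int) :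
    pvAt (pvSet g r c v) r.toNat c.toNat = v := by
  obtain ⟨h1, h2⟩ := hs
  have hrn : r.toNat < g.length := by omega
  have hC : (g[r.toNat]'hrn).length = C := by
    have := h2 r.toNat (by omega)
    simpa [List.getElem?_eq_getElem hrn] using this
  have hcn : c.toNat < (g[r.toNat]'hrn).length := by omega
  unfold pvAt pvSet
  rw [List.getElem?_modify]
  rw [List.getElem?_eq_getElem hrn]
  simp [List.getElem?_set_self (by simpa using hcn)]

theorem pvAt_pvSet_ne (g : PvGrid) (r c : Int) (v : Option Int) {i j : Nat}
    (hne : ¬(i = r.toNat ∧ j = c.toNat)) :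
    pvAt (pvSet g r c v) i j = pvAt g i j := by
  unfold pvAt pvSet
  rw [List.getElem?_modify]
  by_cases hi : r.toNat = i
  · subst hi
    have hj : j ≠ c.toNat := by tauto
    cases hg : g[r.toNat]? with
    | none => simp
    | some row => simp [List.getElem?_set_ne (by omega : c.toNat ≠ j)]
  · simp [hi]

theorem pvGet_pvSet_self {g : PvGrid} {R C : Nat} (hs : pvShape g R C) {r c : Int}
    (hr0 : 0 ≤ r) (hr : r < (R : Int)) (hc0 : 0 ≤ c) (hc : c < (C : Int)) (v : Option Int) :
    pvGet (pvSet g r c v) r c = v := by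
  rw [pvGet_eq_pvAt _ hr0 hc0]
  exact pvAt_pvSet_self hs hr0 hr hc0 hc v

theorem pvGet_pvSet_ne {g : PvGrid} {r c r' c' : Int}
    (hr0 : 0 ≤ r) (hc0 : 0 ≤ c) (hr0' : 0 ≤ r') (hc0' : 0 ≤ c')
    (v : Option Int) (hne : ¬(r' = r ∧ c' = c)) :
    pvGet (pvSet g r c v) r' c' = pvGet g r' c' := by
  rw [pvGet_eq_pvAt _ hr0' hc0', pvGet_eq_pvAt _ hr0' hc0']
  exact pvAt_pvSet_ne g r c v (by omega)

theorem pvShape_replicate (R C : Nat) :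
    pvShape (List.replicate R (List.replicate C (none : Option Int))) R C := by
  constructor
  · simp
  · intro i hi
    simp [hi]

theorem pvGet_replicate {R C : Nat} {r c : Int} (hr0 : 0 ≤ r) (hc0 : 0 ≤ c) :
    pvGet (List.replicate R (List.replicate C (none : Option Int))) r c = none := by
  rw [pvGet_eq_pvAt _ hr0 hc0]
  unfold pvAt
  rw [List.getElem?_replicate]
  split
  · simp [List.getElem?_replicate]
    split <;> simp
  · simp

def pvCandAt (res dist : PvGrid) (r c : Int) : Option PvEnt :=
  if (pvGet res r c).isNone then (pvGet dist r c).map (fun d => (d, r, c)) else none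

def pvStep (res dist : PvGrid) (acc : Option PvEnt) (p : Int × Int) : Option PvEnt :=
  match pvCandAt res dist p.1 p.2 with
  | none => acc
  | some t =>
    match acc with
    | none => some t
    | some b => if t.1 < b.1 then some t else acc

def pvCellList (rows cols : Int) : List (Int × Int) :=
  (PySem.List.pyRange 0 rows 1).flatMap (fun r => (PySem.List.pyRange 0 cols 1).map (fun c => (r, c)))

theorem pvScanBest_eq_foldl (res dist : PvGrid) (rows cols : Int) :
    pvScanBest res dist rows cols = (pvCellList rows cols).foldl (pvStep res dist) none := by
  unfold pvScanBest pvCellList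
  rw [List.foldl_flatMap]
  congr 1
  funext acc r
  rw [List.foldl_map]
  congr 1
  funext acc' c
  unfold pvStep pvCandAt
  by_cases h1 : (pvGet res r c).isNone
  · simp only [h1, if_pos]
    cases hd : pvGet dist r c with
    | none => simp
    | some d => cases acc' <;> simp
  · simp only [h1]
    simp

theorem pvMem_cellList {rows cols : Int} {p : Int × Int} :
    p ∈ pvCellList rows cols ↔ 0 ≤ p.1 ∧ p.1 < rows ∧ 0 ≤ p.2 ∧ p.2 < cols := by
  obtain ⟨p1, p2⟩ := p
  simp only [pvCellList, List.mem_flatMap, List.mem_map, PySem.List.mem_pyRange_one]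
  constructor
  · rintro ⟨r, hr, c, hc, heq⟩
    injection heq with e1 e2
    subst e1; subst e2
    exact ⟨hr.1, hr.2, hc.1, hc.2⟩
  · rintro ⟨h1, h2, h3, h4⟩
    exact ⟨p1, ⟨h1, h2⟩, p2, ⟨h3, h4⟩, rfl⟩

def pvCellLt (p q : Int × Int) : Prop := p.1 < q.1 ∨ (p.1 = q.1 ∧ p.2 < q.2)

theorem pvPairwise_flat (rs : List Int) (cols : Int) (h : rs.Pairwise (· < ·)) :
    (rs.flatMap (fun r => (PySem.List.pyRange 0 cols 1).map (fun c => (r, c)))).Pairwise pvCellLt := by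
  induction rs with
  | nil => simp
  | cons r rs ih =>
    simp only [List.flatMap_cons]
    rw [List.pairwise_append]
    refine ⟨?_, ih h.of_cons, ?_⟩
    · rw [List.pairwise_map]
      exact (PySem.List.pairwise_lt_pyRange_one 0 cols).imp
        (fun hlt => Or.inr ⟨rfl, hlt⟩)
    · intro x hx y hy
      obtain ⟨c1, _, rfl⟩ := List.mem_map.mp hx
      obtain ⟨r2, hr2, hy2⟩ := List.mem_flatMap.mp hy
      obtain ⟨c2, _, rfl⟩ := List.mem_map.mp hy2
      have : r < r2 := (List.pairwise_cons.mp h).1 r2 hr2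
      exact Or.inl this

theorem pvPairwise_cellList (rows cols : Int) : (pvCellList rows cols).Pairwise pvCellLt :=
  pvPairwise_flat _ _ (PySem.List.pairwise_lt_pyRange_one 0 rows)

theorem pvCandAt_cell {res dist : PvGrid} {r c : Int} {t : PvEnt}
    (h : pvCandAt res dist r c = some t) :
    t.2.1 = r ∧ t.2.2 = c ∧ pvGet res r c = none ∧ pvGet dist r c = some t.1 := by
  unfold pvCandAt at h
  split at h
  case isTrue hN =>
    cases hd : pvGet dist r c with
    | none => rw [hd] at h; simp at h
    | some d =>
      rw [hd] at h
      simp at h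
      subst h
      exact ⟨rfl, rfl, Option.isNone_iff_eq_none.mp hN, rfl⟩
  case isFalse => simp at h

theorem pvFold_step_none {res dist : PvGrid} {L : List (Int × Int)}
    (h : ∀ p ∈ L, pvCandAt res dist p.1 p.2 = none) (acc : Option PvEnt) :
    L.foldl (pvStep res dist) acc = acc := by
  induction L generalizing acc with
  | nil => rfl
  | cons p L ih =>
    rw [List.foldl_cons]
    have hstep : pvStep res dist acc p = acc := by
      unfold pvStep
      rw [h p (List.mem_cons_self)]
    rw [hstep]
    exact ih (fun x hx => h x (List.mem_cons_of_mem _ hx)) acc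

theorem pvFold_step_sources {res dist : PvGrid} {L : List (Int × Int)} :
    ∀ {acc : Option PvEnt} {t : PvEnt}, L.foldl (pvStep res dist) acc = some t →
    acc = some t ∨ ∃ p ∈ L, pvCandAt res dist p.1 p.2 = some t := by
  induction L with
  | nil => intro acc t h; exact Or.inl h
  | cons p L ih =>
    intro acc t h
    rw [List.foldl_cons] at h
    rcases ih h with hstep | ⟨p', hp', hc⟩
    · cases hc : pvCandAt res dist p.1 p.2 with
      | none =>
        simp only [pvStep, hc] at hstep
        exact Or.inl hstep
      | some u =>
        cases acc with
        | none =>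
          simp only [pvStep, hc] at hstep
          exact Or.inr ⟨p, List.mem_cons_self, by rw [hc, hstep]⟩
        | some b =>
          simp only [pvStep, hc] at hstep
          by_cases hlt : u.1 < b.1
          · rw [if_pos hlt] at hstep
            exact Or.inr ⟨p, List.mem_cons_self, by rw [hc, hstep]⟩
          · rw [if_neg hlt] at hstep
            exact Or.inl hstep
    · exact Or.inr ⟨p', List.mem_cons_of_mem _ hp', hc⟩

theorem pvFold_keep_min {res dist : PvGrid} {L : List (Int × Int)} {b : PvEnt}
    (h : ∀ p ∈ L, ∀ t, pvCandAt res dist p.1 p.2 = some t → b.1 ≤ t.1) :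
    L.foldl (pvStep res dist) (some b) = some b := by
  induction L with
  | nil => rfl
  | cons p L ih =>
    rw [List.foldl_cons]
    have hstep : pvStep res dist (some b) p = some b := by
      cases hc : pvCandAt res dist p.1 p.2 with
      | none => simp only [pvStep, hc]
      | some u =>
        have := h p List.mem_cons_self u hc
        simp only [pvStep, hc]
        rw [if_neg (by omega)]
    rw [hstep]
    exact ih (fun x hx t ht => h x (List.mem_cons_of_mem _ hx) t ht)

theorem pvScan_finds {res dist : PvGrid} {rows cols : Int} {db rb cb : Int}
    (hmem : (rb, cb) ∈ pvCellList rows cols)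
    (hcand : pvCandAt res dist rb cb = some (db, rb, cb))
    (hmin : ∀ p ∈ pvCellList rows cols, ∀ t, pvCandAt res dist p.1 p.2 = some t →
      t = (db, rb, cb) ∨ pvEntLt (db, rb, cb) t = true) :
    pvScanBest res dist rows cols = some (db, rb, cb) := by
  rw [pvScanBest_eq_foldl]
  obtain ⟨before, after, hsplit⟩ := List.append_of_mem hmem
  have hpw := pvPairwise_cellList rows cols
  rw [hsplit] at hpw ⊢
  rw [List.foldl_append, List.foldl_cons]
  obtain ⟨hpw1, hpw2, hcross⟩ := List.pairwise_append.mp hpw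
  have hmid : pvStep res dist (List.foldl (pvStep res dist) none before) (rb, cb)
      = some (db, rb, cb) := by
    cases hA : List.foldl (pvStep res dist) none before with
    | none =>
      simp only [pvStep, hcand]
    | some t =>
      rcases pvFold_step_sources hA with hbad | ⟨p, hpB, hpc⟩
      · exact absurd hbad (by simp)
      · obtain ⟨ht1, ht2, _, _⟩ := pvCandAt_cell hpc
        have hlt : pvCellLt p (rb, cb) := hcross p hpB (rb, cb) List.mem_cons_self
        unfold pvCellLt at hlt
        have hment : t = (db, rb, cb) ∨ pvEntLt (db, rb, cb) t = true := by
          apply hmin p _ t hpc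
          rw [hsplit]
          exact List.mem_append_left _ hpB
        have hdb : db < t.1 := by
          rcases hment with rfl | h'
          · exfalso
            have h1 : rb = p.1 := ht1
            have h2 : cb = p.2 := ht2
            omega
          · rw [pvEntLt_iff] at h'
            rcases h' with h' | ⟨he, h''⟩
            · exact h'
            · exfalso
              rw [ht1, ht2] at h''
              have h3 : rb < p.1 ∨ (rb = p.1 ∧ cb < p.2) := h''
              omega
        simp only [pvStep, hcand]
        rw [if_pos hdb]
  rw [hmid]
  apply pvFold_keep_min
  intro p hpA t hpc
  have hment := hmin p
    (by rw [hsplit]; exact List.mem_append_right _ (List.mem_cons_of_mem _ hpA)) t hpc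
  show db ≤ t.1
  rcases hment with rfl | h'
  · exact le_refl db
  · rw [pvEntLt_iff] at h'
    rcases h' with h' | ⟨he, _⟩ <;> omega

theorem pvScan_none {res dist : PvGrid} {rows cols : Int}
    (h : ∀ p ∈ pvCellList rows cols, pvCandAt res dist p.1 p.2 = none) :
    pvScanBest res dist rows cols = none := by
  rw [pvScanBest_eq_foldl]
  exact pvFold_step_none h none

def pvMinRel (q : List PvEnt) (dist : PvGrid) (r c : Int) : Prop :=
  (pvGet dist r c = none → ∀ e ∈ q, ¬(e.2.1 = r ∧ e.2.2 = c)) ∧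
  (∀ d, pvGet dist r c = some d →
    ((d, r, c) ∈ q ∧ ∀ e ∈ q, e.2.1 = r → e.2.2 = c → d ≤ e.1))

def pvINV (rows cols : Int) (q : List PvEnt) (res dist : PvGrid) : Prop :=
  (∀ e ∈ q, 0 ≤ e.2.1 ∧ e.2.1 < rows ∧ 0 ≤ e.2.2 ∧ e.2.2 < cols) ∧
  (∀ r c, 0 ≤ r → r < rows → 0 ≤ c → c < cols → pvGet res r c = none → pvMinRel q dist r c)

theorem pvMinRel_of_perm {q q' : List PvEnt} {e0 : PvEnt} {dist : PvGrid} {r c : Int}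
    (hperm : q.Perm (e0 :: q')) (hcell : ¬(e0.2.1 = r ∧ e0.2.2 = c))
    (h : pvMinRel q dist r c) : pvMinRel q' dist r c := by
  obtain ⟨h1, h2⟩ := h
  constructor
  · intro hd e he
    exact h1 hd e (hperm.symm.subset (List.mem_cons_of_mem _ he))
  · intro d hd
    obtain ⟨hm, hb⟩ := h2 d hd
    have hm' : (d, r, c) ∈ e0 :: q' := hperm.subset hm
    rcases List.mem_cons.mp hm' with heq | hm''
    · exfalso; apply hcell; rw [← heq]; exact ⟨rfl, rfl⟩
    · exact ⟨hm'', fun e he h1' h2' =>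
        hb e (hperm.symm.subset (List.mem_cons_of_mem _ he)) h1' h2'⟩

-- per-neighbour step functions: what A's push loop and B's relax loop do for one neighbour cell

def pvPushF (rows cols : Int) (res' : PvGrid) (next_cost : Int)
    (acc : List PvEnt) (v : Int × Int) : List PvEnt :=
  if 0 ≤ v.1 ∧ v.1 < rows ∧ 0 ≤ v.2 ∧ v.2 < cols then
    (if (pvGet res' v.1 v.2).isNone then acc ++ [(next_cost, v.1, v.2)] else acc)
  else acc

def pvRelaxF (rows cols : Int) (res' : PvGrid) (next_cost : Int)
    (dG : PvGrid) (rc : Int × Int) : PvGrid :=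
  if 0 ≤ rc.1 ∧ rc.1 < rows ∧ 0 ≤ rc.2 ∧ rc.2 < cols ∧ (pvGet res' rc.1 rc.2).isNone then
    match pvGet dG rc.1 rc.2 with
    | none => pvSet dG rc.1 rc.2 (some next_cost)
    | some d0 => if next_cost < d0 then pvSet dG rc.1 rc.2 (some next_cost) else dG
  else dG

theorem pvRelaxStep (rows cols : Int) (res' : PvGrid) (next_cost : Int) (v : Int × Int)
    (q : List PvEnt) (dist : PvGrid)
    (hsh : pvShape dist rows.toNat cols.toNat)
    (hbnd : ∀ e ∈ q, 0 ≤ e.2.1 ∧ e.2.1 < rows ∧ 0 ≤ e.2.2 ∧ e.2.2 < cols)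
    (hmr : ∀ r c, 0 ≤ r → r < rows → 0 ≤ c → c < cols → pvGet res' r c = none →
      pvMinRel q dist r c) :
    pvShape (pvRelaxF rows cols res' next_cost dist v) rows.toNat cols.toNat ∧
    (∀ e ∈ pvPushF rows cols res' next_cost q v,
      0 ≤ e.2.1 ∧ e.2.1 < rows ∧ 0 ≤ e.2.2 ∧ e.2.2 < cols) ∧
    (∀ r c, 0 ≤ r → r < rows → 0 ≤ c → c < cols → pvGet res' r c = none →
      pvMinRel (pvPushF rows cols res' next_cost q v)
        (pvRelaxF rows cols res' next_cost dist v) r c) := by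
  by_cases hb : 0 ≤ v.1 ∧ v.1 < rows ∧ 0 ≤ v.2 ∧ v.2 < cols
  · by_cases hset : (pvGet res' v.1 v.2).isNone
    · have hq2 : pvPushF rows cols res' next_cost q v = q ++ [(next_cost, v.1, v.2)] := by
        unfold pvPushF; rw [if_pos hb, if_pos hset]
      have hcB : (0 ≤ v.1 ∧ v.1 < rows ∧ 0 ≤ v.2 ∧ v.2 < cols ∧
          (pvGet res' v.1 v.2).isNone = true) :=
        ⟨hb.1, hb.2.1, hb.2.2.1, hb.2.2.2, hset⟩
      have hbnd2 : ∀ e ∈ q ++ [(next_cost, v.1, v.2)],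
          0 ≤ e.2.1 ∧ e.2.1 < rows ∧ 0 ≤ e.2.2 ∧ e.2.2 < cols := by
        intro e he
        rcases List.mem_append.mp he with he' | he'
        · exact hbnd e he'
        · rw [List.mem_singleton.mp he']
          exact ⟨hb.1, hb.2.1, hb.2.2.1, hb.2.2.2⟩
      cases hd : pvGet dist v.1 v.2 with
      | none =>
        have hd2 : pvRelaxF rows cols res' next_cost dist v
            = pvSet dist v.1 v.2 (some next_cost) := by
          unfold pvRelaxF; rw [if_pos hcB, hd]
        rw [hq2, hd2]
        refine ⟨pvShape_pvSet hsh _ _ _, hbnd2, ?_⟩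
        intro r c hr0 hr hc0 hc hunset
        by_cases hv : r = v.1 ∧ c = v.2
        · obtain ⟨rfl, rfl⟩ := hv
          constructor
          · intro hnone
            rw [pvGet_pvSet_self hsh hb.1 (by omega) hb.2.2.1 (by omega)] at hnone
            exact absurd hnone (by simp)
          · intro d hdd
            rw [pvGet_pvSet_self hsh hb.1 (by omega) hb.2.2.1 (by omega)] at hdd
            injection hdd with hdd'
            subst hdd'
            constructor
            · exact List.mem_append_right _ (List.mem_singleton.mpr rfl)
            · intro e he h1' h2'
              rcases List.mem_append.mp he with he' | he'
              · exact absurd ⟨h1', h2'⟩ ((hmr v.1 v.2 hr0 hr hc0 hc hunset).1 hd e he')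
              · rw [List.mem_singleton.mp he']
        · have hdist : pvGet (pvSet dist v.1 v.2 (some next_cost)) r c = pvGet dist r c :=
            pvGet_pvSet_ne hb.1 hb.2.2.1 hr0 hc0 _ hv
          have hold := hmr r c hr0 hr hc0 hc hunset
          constructor
          · intro hnone e he
            rcases List.mem_append.mp he with he' | he'
            · exact hold.1 (hdist ▸ hnone) e he'
            · rw [List.mem_singleton.mp he']
              intro hcc
              exact hv ⟨hcc.1.symm, hcc.2.symm⟩
          · intro d hdd
            rw [hdist] at hdd
            obtain ⟨hm, hbound⟩ := hold.2 d hdd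
            refine ⟨List.mem_append_left _ hm, ?_⟩
            intro e he h1' h2'
            rcases List.mem_append.mp he with he' | he'
            · exact hbound e he' h1' h2'
            · rw [List.mem_singleton.mp he'] at h1' h2'
              exact absurd ⟨h1'.symm, h2'.symm⟩ hv
      | some d0 =>
        by_cases hlt : next_cost < d0
        · have hd2 : pvRelaxF rows cols res' next_cost dist v
              = pvSet dist v.1 v.2 (some next_cost) := by
            unfold pvRelaxF; rw [if_pos hcB, hd]
            show (if next_cost < d0 then pvSet dist v.1 v.2 (some next_cost) else dist) = _
            rw [if_pos hlt]
          rw [hq2, hd2]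
          refine ⟨pvShape_pvSet hsh _ _ _, hbnd2, ?_⟩
          intro r c hr0 hr hc0 hc hunset
          by_cases hv : r = v.1 ∧ c = v.2
          · obtain ⟨rfl, rfl⟩ := hv
            constructor
            · intro hnone
              rw [pvGet_pvSet_self hsh hb.1 (by omega) hb.2.2.1 (by omega)] at hnone
              exact absurd hnone (by simp)
            · intro d hdd
              rw [pvGet_pvSet_self hsh hb.1 (by omega) hb.2.2.1 (by omega)] at hdd
              injection hdd with hdd'
              subst hdd'
              constructor
              · exact List.mem_append_right _ (List.mem_singleton.mpr rfl)
              · intro e he h1' h2'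
                rcases List.mem_append.mp he with he' | he'
                · have := ((hmr v.1 v.2 hr0 hr hc0 hc hunset).2 d0 hd).2 e he' h1' h2'
                  omega
                · rw [List.mem_singleton.mp he']
          · have hdist : pvGet (pvSet dist v.1 v.2 (some next_cost)) r c = pvGet dist r c :=
              pvGet_pvSet_ne hb.1 hb.2.2.1 hr0 hc0 _ hv
            have hold := hmr r c hr0 hr hc0 hc hunset
            constructor
            · intro hnone e he
              rcases List.mem_append.mp he with he' | he'
              · exact hold.1 (hdist ▸ hnone) e he'
              · rw [List.mem_singleton.mp he']
                intro hcc
                exact hv ⟨hcc.1.symm, hcc.2.symm⟩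
            · intro d hdd
              rw [hdist] at hdd
              obtain ⟨hm, hbound⟩ := hold.2 d hdd
              refine ⟨List.mem_append_left _ hm, ?_⟩
              intro e he h1' h2'
              rcases List.mem_append.mp he with he' | he'
              · exact hbound e he' h1' h2'
              · rw [List.mem_singleton.mp he'] at h1' h2'
                exact absurd ⟨h1'.symm, h2'.symm⟩ hv
        · have hd2 : pvRelaxF rows cols res' next_cost dist v = dist := by
            unfold pvRelaxF; rw [if_pos hcB, hd]
            show (if next_cost < d0 then pvSet dist v.1 v.2 (some next_cost) else dist) = _
            rw [if_neg hlt]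
          rw [hq2, hd2]
          refine ⟨hsh, hbnd2, ?_⟩
          intro r c hr0 hr hc0 hc hunset
          have hold := hmr r c hr0 hr hc0 hc hunset
          by_cases hv : r = v.1 ∧ c = v.2
          · obtain ⟨rfl, rfl⟩ := hv
            constructor
            · intro hnone
              rw [hnone] at hd
              exact absurd hd (by simp)
            · intro d hdd
              rw [hdd] at hd
              injection hd with hd'
              obtain ⟨hm, hbound⟩ := hold.2 d hdd
              refine ⟨List.mem_append_left _ hm, ?_⟩
              intro e he h1' h2'
              rcases List.mem_append.mp he with he' | he'
              · exact hbound e he' h1' h2'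
              · rw [List.mem_singleton.mp he']
                show d ≤ next_cost
                omega
          · constructor
            · intro hnone e he
              rcases List.mem_append.mp he with he' | he'
              · exact hold.1 hnone e he'
              · rw [List.mem_singleton.mp he']
                intro hcc
                exact hv ⟨hcc.1.symm, hcc.2.symm⟩
            · intro d hdd
              obtain ⟨hm, hbound⟩ := hold.2 d hdd
              refine ⟨List.mem_append_left _ hm, ?_⟩
              intro e he h1' h2'
              rcases List.mem_append.mp he with he' | he'
              · exact hbound e he' h1' h2'
              · rw [List.mem_singleton.mp he'] at h1' h2'
                exact absurd ⟨h1'.symm, h2'.symm⟩ hv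
    · have hq2 : pvPushF rows cols res' next_cost q v = q := by
        unfold pvPushF; rw [if_pos hb, if_neg hset]
      have hd2 : pvRelaxF rows cols res' next_cost dist v = dist := by
        unfold pvRelaxF
        rw [if_neg (fun hC => hset hC.2.2.2.2)]
      rw [hq2, hd2]
      exact ⟨hsh, hbnd, hmr⟩
  · have hq2 : pvPushF rows cols res' next_cost q v = q := by
      unfold pvPushF; rw [if_neg hb]
    have hd2 : pvRelaxF rows cols res' next_cost dist v = dist := by
      unfold pvRelaxF
      rw [if_neg (fun hC => hb ⟨hC.1, hC.2.1, hC.2.2.1, hC.2.2.2.1⟩)]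
    rw [hq2, hd2]
    exact ⟨hsh, hbnd, hmr⟩

theorem pvRelax (rows cols : Int) (res' : PvGrid) (next_cost : Int) :
    ∀ (ns : List (Int × Int)) (q : List PvEnt) (dist : PvGrid),
    pvShape dist rows.toNat cols.toNat →
    (∀ e ∈ q, 0 ≤ e.2.1 ∧ e.2.1 < rows ∧ 0 ≤ e.2.2 ∧ e.2.2 < cols) →
    (∀ r c, 0 ≤ r → r < rows → 0 ≤ c → c < cols → pvGet res' r c = none →
      pvMinRel q dist r c) →
    pvShape (ns.foldl (pvRelaxF rows cols res' next_cost) dist) rows.toNat cols.toNat ∧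
    (∀ e ∈ ns.foldl (pvPushF rows cols res' next_cost) q,
      0 ≤ e.2.1 ∧ e.2.1 < rows ∧ 0 ≤ e.2.2 ∧ e.2.2 < cols) ∧
    (∀ r c, 0 ≤ r → r < rows → 0 ≤ c → c < cols → pvGet res' r c = none →
      pvMinRel (ns.foldl (pvPushF rows cols res' next_cost) q)
        (ns.foldl (pvRelaxF rows cols res' next_cost) dist) r c) := by
  intro ns
  induction ns with
  | nil => intro q dist h1 h2 h3; exact ⟨h1, h2, h3⟩
  | cons v ns ih =>
    intro q dist hsh hbnd hmr
    simp only [List.foldl_cons]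
    obtain ⟨s1, s2, s3⟩ := pvRelaxStep rows cols res' next_cost v q dist hsh hbnd hmr
    exact ih _ _ s1 s2 s3

theorem pvLoopA_zero (in_map : List (List Int)) (rows cols : Int) (q : List PvEnt) (res : PvGrid) :
    pvLoopA in_map rows cols q res 0 = res := by
  rw [pvLoopA]
  simp

theorem pvPush_eq (rows cols row col next_cost : Int) (res' : PvGrid) (q' : List PvEnt) :
    (([((0:Int),(1:Int)), (1,0), (0,-1), (-1,0)]).filterMap
      (fun rc => if 0 ≤ row + rc.1 ∧ row + rc.1 < rows ∧ 0 ≤ col + rc.2 ∧ col + rc.2 < cols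
        then some (next_cost, row + rc.1, col + rc.2) else none)).foldl
      (fun acc s => if (pvGet res' s.2.1 s.2.2).isNone then acc ++ [s] else acc) q'
    = [(row, col + 1), (row + 1, col), (row, col - 1), (row - 1, col)].foldl
        (pvPushF rows cols res' next_cost) q' := by
  rw [List.foldl_filterMap]
  have hlist : [(row, col + 1), (row + 1, col), (row, col - 1), (row - 1, col)]
      = ([((0:Int),(1:Int)), (1,0), (0,-1), (-1,0)]).map
          (fun rc => (row + rc.1, col + rc.2)) := by
    simp
    omega
  rw [hlist, List.foldl_map]
  congr 1
  funext acc rc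
  obtain ⟨dr, dc⟩ := rc
  by_cases hb : 0 ≤ row + dr ∧ row + dr < rows ∧ 0 ≤ col + dc ∧ col + dc < cols
  · simp [pvPushF, hb]
  · simp [pvPushF, hb]

theorem pvScan_of_empty (rows cols : Int) (res dist : PvGrid)
    (h : ∀ r c, 0 ≤ r → r < rows → 0 ≤ c → c < cols → pvGet res r c = none →
      pvMinRel [] dist r c) :
    pvScanBest res dist rows cols = none := by
  apply pvScan_none
  intro p hp
  rcases pvMem_cellList.mp hp with ⟨h1, h2, h3, h4⟩
  unfold pvCandAt
  by_cases hres : (pvGet res p.1 p.2).isNone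
  · rw [if_pos hres]
    cases hd : pvGet dist p.1 p.2 with
    | none => rfl
    | some d =>
      have hmr := h p.1 p.2 h1 h2 h3 h4 (Option.isNone_iff_eq_none.mp hres)
      exact absurd (hmr.2 d hd).1 (by simp)
  · rw [if_neg hres]

theorem pvLoop_eq (in_map : List (List Int)) (rows cols : Int) :
    ∀ (k n : Nat) (q : List PvEnt) (res dist : PvGrid), q.length ≤ n →
    pvShape res rows.toNat cols.toNat → pvShape dist rows.toNat cols.toNat →
    pvINV rows cols q res dist →
    pvLoopA in_map rows cols q res k = pvLoopB in_map rows cols res dist k := by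
  intro k
  induction k with
  | zero =>
    intro n q res dist _ _ _ _
    rw [pvLoopA_zero]
    rfl
  | succ k ihk =>
    intro n
    induction n with
    | zero =>
      intro q res dist hlen hsr hsd hinv
      have hq : q = [] := by
        cases q with
        | nil => rfl
        | cons a as => simp at hlen
      subst hq
      have hscan := pvScan_of_empty rows cols res dist hinv.2
      rw [pvLoopA, dif_neg (Nat.succ_ne_zero k)]
      simp only [pvLoopB, hscan]
      rfl
    | succ n ihn =>
      intro q res dist hlen hsr hsd hinv
      rw [pvLoopA, dif_neg (Nat.succ_ne_zero k)]
      split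
      case h_1 heq =>
        have hq : q = [] := pvExtractMin_eq_none.mp heq
        subst hq
        have hscan := pvScan_of_empty rows cols res dist hinv.2
        simp only [pvLoopB, hscan]
      case h_2 cost row col q' heq =>
        have hperm := pvExtractMin_perm heq
        have hmemq : (cost, row, col) ∈ q := hperm.mem_iff.mpr List.mem_cons_self
        have hbnds := hinv.1 _ hmemq
        have hb1 : 0 ≤ row := hbnds.1
        have hb2 : row < rows := hbnds.2.1
        have hb3 : 0 ≤ col := hbnds.2.2.1
        have hb4 : col < cols := hbnds.2.2.2
        by_cases hS : (pvGet res row col).isSome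
        · rw [if_pos hS]
          apply ihn q' res dist
          · have := pvExtractMin_length heq; omega
          · exact hsr
          · exact hsd
          · constructor
            · intro e he
              exact hinv.1 e (hperm.mem_iff.mpr (List.mem_cons_of_mem _ he))
            · intro r c hr0 hr hc0 hc hunset
              have hcell : ¬((cost, row, col).2.1 = r ∧ (cost, row, col).2.2 = c) := by
                intro hcc
                have hc1 : row = r := hcc.1
                have hc2 : col = c := hcc.2
                rw [← hc1, ← hc2] at hunset
                rw [hunset] at hS
                simp at hS
              exact pvMinRel_of_perm hperm hcell (hinv.2 r c hr0 hr hc0 hc hunset)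
        · rw [if_neg hS]
          have hunsetP : pvGet res row col = none := by
            cases hres : pvGet res row col with
            | none => rfl
            | some x => rw [hres] at hS; simp at hS
          have hmrP := hinv.2 row col hb1 hb2 hb3 hb4 hunsetP
          have hdisteq : pvGet dist row col = some cost := by
            cases hd : pvGet dist row col with
            | none => exact absurd ⟨rfl, rfl⟩ (hmrP.1 hd _ hmemq)
            | some d =>
              obtain ⟨hm, hbd⟩ := hmrP.2 d hd
              have h1' : d ≤ cost := hbd (cost, row, col) hmemq rfl rfl
              have h2' := pvExtractMin_min heq (d, row, col) hm
              have h3' : ¬(d < cost) := by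
                intro hlt
                have := (pvEntLt_iff (d, row, col) (cost, row, col)).mpr (Or.inl hlt)
                rw [h2'] at this
                simp at this
              have : d = cost := by omega
              rw [this]
          have hscan : pvScanBest res dist rows cols = some (cost, row, col) := by
            apply pvScan_finds
            · exact pvMem_cellList.mpr ⟨hb1, hb2, hb3, hb4⟩
            · simp [pvCandAt, hunsetP, hdisteq]
            · intro p hp t hpc
              obtain ⟨ht1, ht2, htres, htdist⟩ := pvCandAt_cell hpc
              rcases pvMem_cellList.mp hp with ⟨hp1, hp2, hp3, hp4⟩
              have hmrp := hinv.2 p.1 p.2 hp1 hp2 hp3 hp4 htres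
              obtain ⟨hm, _⟩ := hmrp.2 t.1 htdist
              have hfalse := pvExtractMin_min heq _ hm
              have ht : t = (t.1, p.1, p.2) := by
                obtain ⟨t1, t2, t3⟩ := t
                have e1 : t2 = p.1 := ht1
                have e2 : t3 = p.2 := ht2
                rw [e1, e2]
              cases hbx : pvEntLt (cost, row, col) (t.1, p.1, p.2) with
              | true =>
                right
                rw [ht]
                exact hbx
              | false =>
                left
                rw [ht]
                exact pvEntLt_antisymm hfalse hbx
          simp only [Nat.add_sub_cancel]
          rw [pvPush_eq]
          have hres' := pvShape_pvSet hsr row col (some (cost : Int))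
          have hq'bnd : ∀ e ∈ q', 0 ≤ e.2.1 ∧ e.2.1 < rows ∧ 0 ≤ e.2.2 ∧ e.2.2 < cols :=
            fun e he => hinv.1 e (hperm.mem_iff.mpr (List.mem_cons_of_mem _ he))
          have hq'mr : ∀ r c, 0 ≤ r → r < rows → 0 ≤ c → c < cols →
              pvGet (pvSet res row col (some cost)) r c = none → pvMinRel q' dist r c := by
            intro r c hr0 hr hc0 hc hunset
            have hvne : ¬(r = row ∧ c = col) := by
              intro hcc
              obtain ⟨rfl, rfl⟩ := hcc
              rw [pvGet_pvSet_self hsr hb1 (by omega) hb3 (by omega)] at hunset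
              simp at hunset
            rw [pvGet_pvSet_ne hb1 hb3 hr0 hc0 _ hvne] at hunset
            have hcell : ¬((cost, row, col).2.1 = r ∧ (cost, row, col).2.2 = c) := by
              intro hcc
              have hc1 : row = r := hcc.1
              have hc2 : col = c := hcc.2
              exact hvne ⟨hc1.symm, hc2.symm⟩
            exact pvMinRel_of_perm hperm hcell (hinv.2 r c hr0 hr hc0 hc hunset)
          obtain ⟨s1, s2, s3⟩ := pvRelax rows cols (pvSet res row col (some cost))
            (cost + PySem.List.pyGetD (PySem.List.pyGetD in_map row []) col 0)
            [(row, col + 1), (row + 1, col), (row, col - 1), (row - 1, col)]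
            q' dist hsd hq'bnd hq'mr
          have hmain := ihk _ _ _ _ (le_refl _) hres' s1 ⟨s2, s3⟩
          rw [hmain]
          simp only [pvLoopB, hscan]
          rfl

-- ===== VERDICT (by name: the statement is the Claim_ definition above) =====
theorem precalculate_heuristic_spec : Claim_equal_precalculate_heuristic := by
  intro in_map _hdom hpre
  obtain ⟨hne, _hrect⟩ := hpre
  show precalculate_heuristic in_map = precalculate_heuristic_alt in_map
  simp only [precalculate_heuristic, precalculate_heuristic_alt]
  have hR : 0 < in_map.length := by
    cases in_map with
    | nil => exact absurd rfl hne
    | cons a l => simp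
  rcases Nat.eq_zero_or_pos (PySem.List.pyGetD in_map 0 []).length with hc0 | hcpos
  · rw [hc0]
    simp only [Nat.mul_zero]
    rw [pvLoopA_zero]
    rfl
  · congr 1
    rw [if_pos hcpos]
    have htR : ((in_map.length : Int)).toNat = in_map.length := Int.toNat_natCast _
    have htC : ((((PySem.List.pyGetD in_map 0 []).length : Nat) : Int)).toNat
        = (PySem.List.pyGetD in_map 0 []).length := Int.toNat_natCast _
    apply pvLoop_eq in_map _ _ _ 1
    · simp
    · rw [htR, htC]
      exact pvShape_replicate _ _
    · rw [htR, htC]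
      exact pvShape_pvSet (pvShape_replicate _ _) _ _ _
    · constructor
      · intro e he
        rw [List.mem_singleton.mp he]
        refine ⟨?_, ?_, ?_, ?_⟩
        · show (0:Int) ≤ (in_map.length : Int) - 1
          omega
        · show (in_map.length : Int) - 1 < (in_map.length : Int)
          omega
        · show (0:Int) ≤ ((PySem.List.pyGetD in_map 0 []).length : Int) - 1
          omega
        · show ((PySem.List.pyGetD in_map 0 []).length : Int) - 1
            < ((PySem.List.pyGetD in_map 0 []).length : Int)
          omega
      · intro r c hr0 hr hc0' hc _hunset
        by_cases hv : r = (in_map.length : Int) - 1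
            ∧ c = ((PySem.List.pyGetD in_map 0 []).length : Int) - 1
        · obtain ⟨rfl, rfl⟩ := hv
          constructor
          · intro hnone
            rw [pvGet_pvSet_self (pvShape_replicate _ _) (by omega) (by omega) (by omega)
              (by omega)] at hnone
            simp at hnone
          · intro d hdd
            rw [pvGet_pvSet_self (pvShape_replicate _ _) (by omega) (by omega) (by omega)
              (by omega)] at hdd
            injection hdd with hdd'
            subst hdd'
            refine ⟨List.mem_singleton.mpr rfl, ?_⟩
            intro e he _ _
            rw [List.mem_singleton.mp he]
        · constructor
          · intro _ e he hcc
            rw [List.mem_singleton.mp he] at hcc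
            exact hv ⟨hcc.1.symm, hcc.2.symm⟩
          · intro d hdd
            rw [pvGet_pvSet_ne (by omega) (by omega) hr0 hc0' _ hv] at hdd
            rw [pvGet_replicate hr0 hc0'] at hdd
            simp at hdd
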